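-- pv_equiv track=rewrite | github.com/lopentu/PythonForHumanities | lab/Week8/daily_log_hint_0.py | group_max
-- ===== SOURCE A (Python) =====
-- def group_max(ev_data, ev_info):
--     max_dict = {}
--     for ev_x in ev_data:
--         ev_category = ev_x[1]
--         max_val = max_dict.get(ev_category, 0)
--         max_val = max(max_val, ev_x[2])
--         max_dict[ev_category] = max_val
--
--     output_text = format_group_message(
--         "{detail}，最高紀錄是{value}{unit}\n", max_dict, ev_info)
--     return output_text
--
-- def format_group_message(template, group_dict, ev_info):
--     output_text = ""
--     for group_cat, group_val in group_dict.items():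
--         group_detail = ev_info[group_cat]["detail"]
--         group_unit = ev_info[group_cat]["unit"]
--         output_text += template.format(
--             category=group_cat,
--             detail=group_detail,
--             value=group_val,
--             unit=group_unit
--         )
--     return output_text
-- ===== SOURCE B (Python) =====
-- def group_max(ev_data, ev_info):
--     # group values per category first (insertion order), then take each max with the 0 floor
--     groups = {}
--     for _, category, value in ev_data:
--         groups.setdefault(category, []).append(value)
--     lines = []
--     for category, values in groups.items():
--         info = ev_info[category]
--         lines.append(f"{info['detail']}，最高紀錄是{max([0, *values])}{info['unit']}\n")
--     return "".join(lines)
-- ===== Notes on version B (the rewrite author's own statement) =====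
-- stated objective: alternative
-- what changed: B first groups the values per category into lists (one dict of lists, insertion order), then computes each category's max with the 0 floor and formats all lines at once with ''.join, instead of A's running-max dict updated on every record plus a string-accumulating format loop.
import Mathlib
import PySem

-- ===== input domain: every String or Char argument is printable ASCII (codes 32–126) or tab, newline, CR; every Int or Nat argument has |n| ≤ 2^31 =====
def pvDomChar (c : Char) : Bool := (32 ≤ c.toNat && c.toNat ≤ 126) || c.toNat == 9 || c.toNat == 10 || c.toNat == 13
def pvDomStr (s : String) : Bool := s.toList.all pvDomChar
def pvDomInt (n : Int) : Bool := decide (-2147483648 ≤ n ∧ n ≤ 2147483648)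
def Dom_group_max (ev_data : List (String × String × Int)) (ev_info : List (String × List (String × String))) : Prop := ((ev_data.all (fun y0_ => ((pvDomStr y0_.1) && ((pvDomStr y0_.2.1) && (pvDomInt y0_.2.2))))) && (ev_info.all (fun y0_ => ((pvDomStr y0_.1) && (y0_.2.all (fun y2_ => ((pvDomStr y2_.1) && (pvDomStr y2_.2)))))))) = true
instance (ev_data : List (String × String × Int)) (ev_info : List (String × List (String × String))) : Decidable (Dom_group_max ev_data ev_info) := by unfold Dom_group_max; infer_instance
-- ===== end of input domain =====

-- B groups the values per category into lists first, then takes each max (0 floor) and joins the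
-- formatted lines; A keeps a running max per category and accumulates the output string. Same result.

-- ===== PORT A =====
-- ev_info[cat][fld] : both Pythons do exactly this double dict lookup; the `.getD` defaults are
-- only reached where Python raises KeyError, which Pre_group_max excludes.
def pvInfoField (ev_info : List (String × List (String × String))) (cat fld : String) : String :=
  ((PySem.Dict.ofList (((PySem.Dict.ofList ev_info).get? cat).getD [])).get? fld).getD ""

-- template.format(...) for the literal template "{detail}，最高紀錄是{value}{unit}\n" ({category} unused):
-- exact as the concatenation below
def pvFmtLine (ev_info : List (String × List (String × String))) (cat : String) (v : Int) : String :=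
  pvInfoField ev_info cat "detail" ++ "，最高紀錄是" ++ PySem.Int.toStr v ++ pvInfoField ev_info cat "unit" ++ "\n"

-- format_group_message: loop over dict items, output_text += template.format(...)
def formatGroupMessage (group_dict : PySem.Dict String Int) (ev_info : List (String × List (String × String))) : String :=
  group_dict.items.foldl (fun acc p => acc ++ pvFmtLine ev_info p.1 p.2) ""

def group_max (ev_data : List (String × String × Int)) (ev_info : List (String × List (String × String))) : String :=
  let max_dict := ev_data.foldl (fun d x => d.insert x.2.1 (max (d.getD x.2.1 0) x.2.2)) PySem.Dict.empty
  formatGroupMessage max_dict ev_info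

-- ===== PORT B =====
def group_max_alt (ev_data : List (String × String × Int)) (ev_info : List (String × List (String × String))) : String :=
  let groups := ev_data.foldl (fun d x => d.modify x.2.1 [] (· ++ [x.2.2])) PySem.Dict.empty
  PySem.Str.join "" (groups.items.map (fun p => pvFmtLine ev_info p.1 (p.2.foldl max 0)))

-- ===== PRECONDITION & SPEC =====
def pvInfoOk (ev_info : List (String × List (String × String))) (cat : String) : Bool :=
  match (PySem.Dict.ofList ev_info).get? cat with
  | none => false
  | some info => ((PySem.Dict.ofList info).get? "detail").isSome && ((PySem.Dict.ofList info).get? "unit").isSome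

-- excludes exactly the inputs where A raises KeyError: some record's category is missing from
-- ev_info, or its info dict lacks "detail" or "unit" (B raises there too)
def Pre_group_max (ev_data : List (String × String × Int)) (ev_info : List (String × List (String × String))) : Prop :=
  ∀ x ∈ ev_data, pvInfoOk ev_info x.2.1 = true
instance (ev_data : List (String × String × Int)) (ev_info : List (String × List (String × String))) : Decidable (Pre_group_max ev_data ev_info) := by unfold Pre_group_max; infer_instance

def pvWitness_group_max : (List (String × String × Int)) × (List (String × List (String × String))) :=
  ([("mon", "run", 5), ("tue", "run", -2), ("tue", "swim", 3)],
   [("run", [("detail", "running"), ("unit", "km")]), ("swim", [("detail", "swimming"), ("unit", "m")])])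

def Spec_group_max (ev_data : List (String × String × Int)) (ev_info : List (String × List (String × String))) (out : String) : Prop := out = group_max_alt ev_data ev_info
instance (ev_data : List (String × String × Int)) (ev_info : List (String × List (String × String))) (out : String) : Decidable (Spec_group_max ev_data ev_info out) := by unfold Spec_group_max; infer_instance

-- ===== CLAIM (what is proved, stated in full; the proofs are below) =====
def Claim_equal_group_max : Prop := ∀ (ev_data : List (String × String × Int)) (ev_info : List (String × List (String × String))), Dom_group_max ev_data ev_info → Pre_group_max ev_data ev_info → Spec_group_max ev_data ev_info (group_max ev_data ev_info)

-- ===== LEMMAS AND PROOFS =====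

-- A's running-max dict at key c is the 0-floored max of all values recorded under c
theorem getD_foldl_insert_max (l : List (String × String × Int)) (d : PySem.Dict String Int) (c : String) :
    (l.foldl (fun d x => d.insert x.2.1 (max (d.getD x.2.1 0) x.2.2)) d).getD c 0
      = ((l.filter (fun x => x.2.1 == c)).map (fun x => x.2.2)).foldl max (d.getD c 0) := by
  induction l generalizing d with
  | nil => rfl
  | cons x xs ih =>
    simp only [List.foldl_cons, ih, List.filter_cons]
    by_cases h : x.2.1 = c
    · simp [h]
    · simp [PySem.Dict.getD_insert, h, Ne.symm h]

-- B's grouping dict at key c is the list of all values recorded under c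
theorem getD_foldl_modify_group (l : List (String × String × Int)) (d : PySem.Dict String (List Int)) (c : String) :
    (l.foldl (fun d x => d.modify x.2.1 [] (· ++ [x.2.2])) d).getD c []
      = d.getD c [] ++ (l.filter (fun x => x.2.1 == c)).map (fun x => x.2.2) := by
  induction l generalizing d with
  | nil => simp
  | cons x xs ih =>
    simp only [List.foldl_cons, ih, List.filter_cons]
    by_cases h : x.2.1 = c
    · simp [h]
    · simp [PySem.Dict.getD_modify, h, Ne.symm h]

theorem flatten_intersperse_nil (xs : List (List Char)) : (List.intersperse [] xs).flatten = xs.flatten := by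
  induction xs with
  | nil => rfl
  | cons x xs ih =>
    cases xs with
    | nil => rfl
    | cons y ys => simp_all [List.intersperse]

theorem foldl_append_toList (L : List String) (a : String) :
    (L.foldl (· ++ ·) a).toList = a.toList ++ (L.map String.toList).flatten := by
  induction L generalizing a with
  | nil => simp
  | cons x xs ih => simp [ih, String.toList_append]

-- "".join(lines) is the left fold of ++ (what A's += loop computes)
theorem join_empty_eq_foldl (L : List String) : PySem.Str.join "" L = L.foldl (· ++ ·) "" := by
  have h : (L.foldl (· ++ ·) "" : String).toList = (L.map String.toList).flatten := by
    simpa using foldl_append_toList L ""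
  calc PySem.Str.join "" L = String.ofList ((L.foldl (· ++ ·) "" : String).toList) := by
        simp [PySem.Str.join, PySem.Chars.join, h, List.intercalate, flatten_intersperse_nil]
    _ = _ := String.ofList_toList

-- ===== VERDICT (by name: the statement is the Claim_ definition above) =====
theorem group_max_spec : Claim_equal_group_max := by
  intro ev_data ev_info _ _
  unfold Spec_group_max group_max group_max_alt formatGroupMessage
  have hA := PySem.Dict.keys_foldl_insert_key ev_data (fun x => x.2.1)
    (fun d x => max (d.getD x.2.1 0) x.2.2) (PySem.Dict.empty : PySem.Dict String Int)
  have hB := PySem.Dict.keys_foldl_modify_key ev_data (fun x => x.2.1) []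
    (fun _ x v => v ++ [x.2.2]) (PySem.Dict.empty : PySem.Dict String (List Int))
  have hndA := PySem.Dict.nodup_keys_foldl_insert_key ev_data (fun x => x.2.1)
    (fun d x => max (d.getD x.2.1 0) x.2.2) (PySem.Dict.empty : PySem.Dict String Int)
    (by simp)
  have hndB := PySem.Dict.nodup_keys_foldl_modify_key ev_data (fun x => x.2.1) []
    (fun _ x v => v ++ [x.2.2]) (PySem.Dict.empty : PySem.Dict String (List Int))
    (by simp)
  dsimp only
  dsimp only at hndA hndB
  rw [PySem.Dict.items_eq_map_keys _ hndA 0, PySem.Dict.items_eq_map_keys _ hndB [],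
      join_empty_eq_foldl, List.map_map, List.foldl_map, List.foldl_map]
  rw [hA, hB]
  have hv : ∀ k : String,
      (ev_data.foldl (fun d x => d.insert x.2.1 (max (d.getD x.2.1 0) x.2.2)) PySem.Dict.empty).getD k 0
      = ((ev_data.foldl (fun d x => d.modify x.2.1 [] (· ++ [x.2.2])) PySem.Dict.empty).getD k []).foldl max 0 := by
    intro k
    rw [getD_foldl_insert_max, getD_foldl_modify_group]
    simp [PySem.Dict.getD_empty]
  simp only [Function.comp]
  congr 1
  funext acc k
  rw [hv k]
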